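-- pv_equiv track=rewrite | github.com/Lazy-Coder-03/python-2023 | 2023-pyhton/Pracsset1/ques2.py | monotonically_desc
-- ===== SOURCE A (Python) =====
-- def monotonically_desc(arr):
--     startInd=0
--     for i in range(len(arr)-1):
--         if arr[i]<arr[i+1]:
--             startInd=i+1
--     if len(arr[startInd:])<=1:
--         return None
--     else:
--         return arr[startInd:]
-- ===== SOURCE B (Python) =====
-- def monotonically_desc(arr):
--     j = len(arr) - 1
--     while j > 0 and arr[j - 1] >= arr[j]:
--         j -= 1
--     if len(arr) - j <= 1:
--         return None
--     return arr[j:]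
-- ===== Notes on version B (the rewrite author's own statement) =====
-- stated objective: alternative
-- what changed: B finds the suffix start by scanning backwards from the end, stopping at the first ascending step, instead of A's full forward scan over every adjacent pair.
import Mathlib
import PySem

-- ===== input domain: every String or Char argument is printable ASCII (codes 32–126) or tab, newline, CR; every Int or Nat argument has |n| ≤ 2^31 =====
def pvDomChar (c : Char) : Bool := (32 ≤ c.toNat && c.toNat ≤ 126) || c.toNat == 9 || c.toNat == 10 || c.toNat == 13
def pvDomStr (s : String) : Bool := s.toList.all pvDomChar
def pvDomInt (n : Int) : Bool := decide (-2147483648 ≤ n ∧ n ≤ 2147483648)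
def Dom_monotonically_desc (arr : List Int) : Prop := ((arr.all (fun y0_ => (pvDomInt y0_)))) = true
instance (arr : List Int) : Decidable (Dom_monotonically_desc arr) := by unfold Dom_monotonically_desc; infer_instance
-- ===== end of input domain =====

-- B scans backwards from the end, stopping at the first ascending step, instead of A's full forward scan; objective: alternative decomposition.

-- ===== PORT A =====
-- arr[i] / arr[i+1] are always in range for i in range(len(arr)-1), so pyGetD is exact here.
def monotonically_desc (arr : List Int) : Option (List Int) :=
  let startInd : Int :=
    (PySem.List.pyRange 0 ((arr.length : Int) - 1) 1).foldl
      (fun s i =>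
        if PySem.List.pyGetD arr i 0 < PySem.List.pyGetD arr (i + 1) 0 then i + 1 else s) 0
  let t := PySem.List.slice arr (some startInd) none
  if t.length ≤ 1 then none else some t

-- ===== PORT B =====
-- the while loop of Source B: j counts down from len-1, stopping at the first ascent seen from the end
def descStart (arr : List Int) : Nat → Nat
  | 0 => 0
  | j + 1 =>
    if PySem.List.pyGetD arr (j : Int) 0 ≥ PySem.List.pyGetD arr ((j : Int) + 1) 0 then
      descStart arr j
    else j + 1

def monotonically_desc_alt (arr : List Int) : Option (List Int) :=
  let j := descStart arr (arr.length - 1)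
  if (arr.length : Int) - (j : Int) ≤ 1 then none
  else PySem.List.slice arr (some (j : Int)) none

-- ===== PRECONDITION & SPEC =====
def Spec_monotonically_desc (arr : List Int) (out : Option (List Int)) : Prop := out = monotonically_desc_alt arr
instance (arr : List Int) (out : Option (List Int)) : Decidable (Spec_monotonically_desc arr out) := by unfold Spec_monotonically_desc; infer_instance

-- ===== CLAIM (what is proved, stated in full; the proofs are below) =====
def Claim_equal_monotonically_desc : Prop := ∀ (arr : List Int), Dom_monotonically_desc arr → Spec_monotonically_desc arr (monotonically_desc arr)

-- ===== LEMMAS AND PROOFS =====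

theorem descStart_le (arr : List Int) (n : Nat) : descStart arr n ≤ n := by
  induction n with
  | zero => simp [descStart]
  | succ j ih =>
    unfold descStart
    split
    · omega
    · omega

/-- A's foldl over range(0, n) computes the same index as B's backward scan. -/
theorem foldl_eq_descStart (arr : List Int) (n : Nat) :
    (PySem.List.pyRange 0 (n : Int) 1).foldl
      (fun s i =>
        if PySem.List.pyGetD arr i 0 < PySem.List.pyGetD arr (i + 1) 0 then i + 1 else s) 0
    = (descStart arr n : Int) := by
  induction n with
  | zero => simp [descStart, PySem.List.pyRange_one_eq_nil]
  | succ j ih =>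
    have hcast : ((j + 1 : Nat) : Int) = (j : Int) + 1 := by push_cast; ring
    rw [hcast, PySem.List.pyRange_one_succ_right (Int.natCast_nonneg j), List.foldl_append]
    simp only [List.foldl_cons, List.foldl_nil, ih]
    rw [show descStart arr (j + 1)
          = if PySem.List.pyGetD arr (j : Int) 0 ≥ PySem.List.pyGetD arr ((j : Int) + 1) 0 then
              descStart arr j
            else j + 1 from rfl]
    by_cases h : PySem.List.pyGetD arr (j : Int) 0 ≥ PySem.List.pyGetD arr ((j : Int) + 1) 0
    · rw [if_neg (by omega), if_pos h]
    · rw [if_pos (by omega), if_neg h]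
      push_cast; ring

-- ===== VERDICT (by name: the statement is the Claim_ definition above) =====
theorem monotonically_desc_spec : Claim_equal_monotonically_desc := by
  intro arr _
  unfold Spec_monotonically_desc monotonically_desc monotonically_desc_alt
  cases harr : arr with
  | nil => simp [PySem.List.pyRange_one_eq_nil, PySem.List.slice_none_none]
  | cons x xs =>
    have hlen : arr.length = xs.length + 1 := by rw [harr]; simp
    rw [← harr]
    have hbound : (arr.length : Int) - 1 = (xs.length : Nat) := by rw [hlen]; push_cast; ring
    rw [hbound, foldl_eq_descStart arr xs.length]
    have hn : arr.length - 1 = xs.length := by omega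
    rw [hn]
    have hj := descStart_le arr xs.length
    set j := descStart arr xs.length with hjdef
    simp only [PySem.List.slice_from_natCast]
    have hlens : (arr.drop j).length = arr.length - j := by simp
    by_cases hc : arr.length - j ≤ 1
    · have h1 : (List.drop j arr).length ≤ 1 := by rw [hlens]; omega
      have h2 : (arr.length : Int) - (j : Int) ≤ 1 := by omega
      rw [if_pos h1, if_pos h2]
    · have h1 : ¬ (List.drop j arr).length ≤ 1 := by rw [hlens]; omega
      have h2 : ¬ ((arr.length : Int) - (j : Int) ≤ 1) := by omega
      rw [if_neg h1, if_neg h2]
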